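-- pv_equiv track=rewrite | github.com/dhruvjwc24/TJHSST-AI-2023-2024 | Crosswords/b.py | getTextFromBlock
-- ===== SOURCE A (Python) =====
-- BLOCKCHAR = "#"
--
-- def getTextFromBlock(block):
--     text = ""
--     i = len(block)-1
--     while i >= 0:
--         if not block[i].isdigit():
--             text = block[i] + text
--             i -= 1
--         else:
--             break
--     if not text: text = BLOCKCHAR
--     return text
-- ===== SOURCE B (Python) =====
-- BLOCKCHAR = "#"
--
-- def getTextFromBlock(block):
--     cut = 0
--     for i, ch in enumerate(block):
--         if ch.isdigit():
--             cut = i + 1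
--     text = block[cut:]
--     return text if text else BLOCKCHAR
-- ===== Notes on version B (the rewrite author's own statement) =====
-- stated objective: faster
-- what changed: B does a single forward pass recording the position just past the last digit seen and returns one slice block[cut:], instead of A's backward scan that builds the result by repeated string prepends (quadratic in the suffix length) and breaks at the first digit.
import Mathlib
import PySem

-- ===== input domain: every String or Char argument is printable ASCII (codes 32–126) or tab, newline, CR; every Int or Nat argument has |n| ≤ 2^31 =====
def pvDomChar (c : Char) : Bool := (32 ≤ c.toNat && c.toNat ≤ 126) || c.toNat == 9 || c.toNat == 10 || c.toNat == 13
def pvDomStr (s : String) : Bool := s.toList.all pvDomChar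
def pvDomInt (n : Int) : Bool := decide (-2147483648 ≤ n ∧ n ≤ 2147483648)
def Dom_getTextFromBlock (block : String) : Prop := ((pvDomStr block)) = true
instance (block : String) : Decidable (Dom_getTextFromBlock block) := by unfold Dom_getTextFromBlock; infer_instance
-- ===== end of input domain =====

-- B replaces A's backward scan-and-prepend with a forward pass that records the
-- position just past the last digit, then takes one slice (objective: alternative).

-- ===== PORT A =====
-- A's while loop: walk from the end, prepend each non-digit char to text, break at a digit.
def pvALoop : List Char → List Char → List Char
  | [], acc => acc
  | c :: rest, acc =>
      if PySem.Chars.isdigit c = false then pvALoop rest (c :: acc) else acc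

def getTextFromBlock (block : String) : String :=
  let text := pvALoop block.toList.reverse []
  if text.isEmpty then "#" else String.ofList text

-- ===== PORT B =====
-- B's forward loop over enumerate(block): cut := i+1 at each digit.
def pvBCut : List Char → Nat → Nat → Nat
  | [], _, cut => cut
  | c :: rest, i, cut => pvBCut rest (i + 1) (if PySem.Chars.isdigit c then i + 1 else cut)

def getTextFromBlock_alt (block : String) : String :=
  let cut := pvBCut block.toList 0 0
  let text := block.toList.drop cut   -- block[cut:] with cut ≥ 0: exact
  if text.isEmpty then "#" else String.ofList text

-- ===== PRECONDITION & SPEC =====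
def Spec_getTextFromBlock (block : String) (out : String) : Prop := out = getTextFromBlock_alt block
instance (block : String) (out : String) : Decidable (Spec_getTextFromBlock block out) := by unfold Spec_getTextFromBlock; infer_instance

-- ===== CLAIM (what is proved, stated in full; the proofs are below) =====
def Claim_equal_getTextFromBlock : Prop := ∀ (block : String), Dom_getTextFromBlock block → Spec_getTextFromBlock block (getTextFromBlock block)

-- ===== LEMMAS AND PROOFS =====

theorem pvALoop_eq (r acc : List Char) :
    pvALoop r acc = (r.takeWhile (fun c => ! PySem.Chars.isdigit c)).reverse ++ acc := by
  induction r generalizing acc with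
  | nil => simp [pvALoop]
  | cons c rest ih =>
    by_cases h : PySem.Chars.isdigit c = false
    · simp [pvALoop, h, ih]
    · simp at h
      simp [pvALoop, h]

theorem pvBCut_append (l : List Char) (c : Char) (i cut : Nat) :
    pvBCut (l ++ [c]) i cut
      = if PySem.Chars.isdigit c then i + l.length + 1 else pvBCut l i cut := by
  induction l generalizing i cut with
  | nil => simp [pvBCut]
  | cons d rest ih =>
    simp only [List.cons_append, pvBCut, ih, List.length_cons]
    split
    · congr 1; omega
    · rfl

theorem pvBCut_le (l : List Char) (i cut : Nat) (h : cut ≤ i + l.length) :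
    pvBCut l i cut ≤ i + l.length := by
  induction l generalizing i cut with
  | nil => simpa [pvBCut] using h
  | cons c rest ih =>
    simp only [pvBCut, List.length_cons]
    have := ih (i + 1) (if PySem.Chars.isdigit c then i + 1 else cut)
      (by split <;> simp at h ⊢ <;> omega)
    omega

theorem pvMain (l : List Char) :
    l.drop (pvBCut l 0 0) = (l.reverse.takeWhile (fun c => ! PySem.Chars.isdigit c)).reverse := by
  induction l using List.reverseRecOn with
  | nil => simp [pvBCut]
  | append_singleton l c ih =>
    rw [pvBCut_append]
    by_cases h : PySem.Chars.isdigit c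
    · simp [h]
    · have hle : pvBCut l 0 0 ≤ l.length := by simpa using pvBCut_le l 0 0 (by simp)
      simp [h, List.drop_append_of_le_length hle, ih]

-- ===== VERDICT (by name: the statement is the Claim_ definition above) =====
theorem getTextFromBlock_spec : Claim_equal_getTextFromBlock := by
  intro block _
  unfold Spec_getTextFromBlock getTextFromBlock getTextFromBlock_alt
  rw [pvALoop_eq, List.append_nil, ← pvMain]
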